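-- pv_equiv track=rewrite | github.com/luluxing/public_lory | sections/user_query.py | _collect_join_paths
-- ===== SOURCE A (Python) =====
-- def _collect_join_paths(
--     input_tables,
--     rel_edges,
--     semantic_edges,
--     spatial_edges,
--     allow_spatial,
--     require_spatial,
--     max_paths=5,
--     max_len=6,
-- ):
--     if not input_tables:
--         return []
--
--     adjacency = {}
--
--     def _add_edge(left, right, edge_type):
--         adjacency.setdefault(left, []).append((right, edge_type))
--         adjacency.setdefault(right, []).append((left, edge_type))
--
--     for left, right, _ in rel_edges or []:
--         _add_edge(left, right, "relation")
--     for left, right, _ in semantic_edges or []: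
--         _add_edge(left, right, "semantic")
--     if allow_spatial:
--         for left, right, _ in spatial_edges or []:
--             _add_edge(left, right, "spatial")
--
--     input_tables = set(input_tables)
--     max_len = max(max_len, len(input_tables))
--     paths = set()
--
--     def _dfs(current, path, has_spatial):
--         if len(paths) >= max_paths:
--             return
--         if input_tables.issubset(path) and (not require_spatial or has_spatial):
--             paths.add(tuple(path))
--         if len(path) >= max_len:
--             return
--         for neighbor, edge_type in adjacency.get(current, []):
--             if neighbor in path:
--                 continue
--             _dfs(neighbor, path + [neighbor], has_spatial or edge_type == "spatial")
--             if len(paths) >= max_paths: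
--                 return
--
--     for start in sorted(input_tables):
--         _dfs(start, [start], False)
--         if len(paths) >= max_paths:
--             break
--
--     return sorted(paths, key=lambda p: (len(p), p))
-- ===== SOURCE B (Python) =====
-- def _collect_join_paths(
--     input_tables,
--     rel_edges,
--     semantic_edges,
--     spatial_edges,
--     allow_spatial,
--     require_spatial,
--     max_paths=5,
--     max_len=6,
-- ):
--     if not input_tables:
--         return []
--
--     groups = [(rel_edges or [], "relation"), (semantic_edges or [], "semantic")]
--     if allow_spatial:
--         groups.append((spatial_edges or [], "spatial"))
--     adjacency = {}
--     for edges, etype in groups: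
--         for left, right, _ in edges:
--             adjacency.setdefault(left, []).append((right, etype))
--             adjacency.setdefault(right, []).append((left, etype))
--
--     required = set(input_tables)
--     max_len = max(max_len, len(required))
--     paths = set()
--
--     stack = [(start, [start], False) for start in sorted(required, reverse=True)]
--     while stack:
--         current, path, has_spatial = stack.pop()
--         if len(paths) >= max_paths:
--             break
--         if required.issubset(path) and (not require_spatial or has_spatial):
--             paths.add(tuple(path))
--         if len(path) < max_len:
--             for neighbor, edge_type in reversed(
--                 [nb for nb in adjacency.get(current, []) if nb[0] not in path]
--             ):
--                 stack.append((neighbor, path + [neighbor], has_spatial or edge_type == "spatial"))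
--
--     return sorted(paths, key=lambda p: (len(p), p))
-- ===== Notes on version B (the rewrite author's own statement) =====
-- stated objective: alternative
-- what changed: Replaces A's recursive _dfs (nested closure recursion with an early-return flag threaded through a for loop) by an iterative DFS over an explicit stack of (node, path, has_spatial) frames, pushing the pending start tables and filtered neighbors so the pop order reproduces A's discovery order; adjacency is built in one loop over (edge-list, type) groups.
import Mathlib
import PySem

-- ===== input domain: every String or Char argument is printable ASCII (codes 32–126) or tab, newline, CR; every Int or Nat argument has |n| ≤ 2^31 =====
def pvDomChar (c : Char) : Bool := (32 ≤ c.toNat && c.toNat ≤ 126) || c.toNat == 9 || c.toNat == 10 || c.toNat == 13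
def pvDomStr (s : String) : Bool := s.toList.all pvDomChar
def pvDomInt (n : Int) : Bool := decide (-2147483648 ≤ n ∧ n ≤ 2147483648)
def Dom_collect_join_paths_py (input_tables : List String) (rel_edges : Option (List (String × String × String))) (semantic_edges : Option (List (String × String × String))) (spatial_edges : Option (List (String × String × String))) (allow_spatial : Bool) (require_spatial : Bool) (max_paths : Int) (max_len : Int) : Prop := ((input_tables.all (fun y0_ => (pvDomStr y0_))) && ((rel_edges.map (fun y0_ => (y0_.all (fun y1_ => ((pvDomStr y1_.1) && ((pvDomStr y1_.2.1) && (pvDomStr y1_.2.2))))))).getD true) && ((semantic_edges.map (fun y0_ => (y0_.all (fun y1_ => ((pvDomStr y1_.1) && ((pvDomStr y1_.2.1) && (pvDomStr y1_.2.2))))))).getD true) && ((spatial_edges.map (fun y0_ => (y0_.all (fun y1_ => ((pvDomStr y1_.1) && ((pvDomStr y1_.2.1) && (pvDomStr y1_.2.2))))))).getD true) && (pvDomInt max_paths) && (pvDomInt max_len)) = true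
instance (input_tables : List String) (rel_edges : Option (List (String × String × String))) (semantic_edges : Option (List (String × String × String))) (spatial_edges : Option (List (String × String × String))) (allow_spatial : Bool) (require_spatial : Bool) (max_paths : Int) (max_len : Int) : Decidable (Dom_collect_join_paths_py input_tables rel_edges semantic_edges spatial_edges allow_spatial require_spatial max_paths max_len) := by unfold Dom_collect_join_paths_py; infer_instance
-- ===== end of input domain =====

-- ===== PORT A =====
-- B is an iterative explicit-stack DFS replacing A's recursive DFS; same return value (alternative decomposition).
-- A-side helpers: pvAddEdge = _add_edge; pvDfsA = _dfs (fuel is a totality guard only: every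
-- call made by the ports carries fuel ≥ maxLen+1-len(path), so the 0 branch is never the result);
-- pvStartStep = one iteration of the top-level 'for start in sorted(...)' loop with its break flag.
def pvAddEdge (d : PySem.Dict String (List (String × String))) (l r t : String) :
    PySem.Dict String (List (String × String)) :=
  let d1 := d.insert l (d.getD l [] ++ [(r, t)])
  d1.insert r (d1.getD r [] ++ [(l, t)])

def pvDfsA (adj : PySem.Dict String (List (String × String))) (inp : PySem.Set String)
    (require_spatial : Bool) (max_paths maxLenN : Int) :
    Nat → String → List String → Bool → PySem.Set (List String) → PySem.Set (List String)
  | 0, _, _, _, paths => paths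
  | fuel+1, current, path, hasSpatial, paths =>
    if max_paths ≤ (paths.length : Int) then paths
    else
      let paths1 := if PySem.Set.issubset inp path && (!require_spatial || hasSpatial)
        then PySem.Set.add paths path else paths
      if maxLenN ≤ (path.length : Int) then paths1
      else
        ((adj.getD current []).foldl (fun st ne =>
          if st.2 then st
          else if path.contains ne.1 then st
          else
            let p2 := pvDfsA adj inp require_spatial max_paths maxLenN fuel ne.1
              (path ++ [ne.1]) (hasSpatial || ne.2 == "spatial") st.1
            (p2, decide (max_paths ≤ (p2.length : Int)))) (paths1, false)).1

def pvStartStep (adj : PySem.Dict String (List (String × String))) (inp : PySem.Set String)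
    (require_spatial : Bool) (max_paths maxLenN : Int)
    (st : PySem.Set (List String) × Bool) (s : String) : PySem.Set (List String) × Bool :=
  if st.2 then st
  else
    let p := pvDfsA adj inp require_spatial max_paths maxLenN maxLenN.toNat s [s] false st.1
    (p, decide (max_paths ≤ (p.length : Int)))

def collect_join_paths_py (input_tables : List String) (rel_edges : Option (List (String × String × String))) (semantic_edges : Option (List (String × String × String))) (spatial_edges : Option (List (String × String × String))) (allow_spatial : Bool) (require_spatial : Bool) (max_paths : Int) (max_len : Int) : List (List String) :=
  if input_tables = [] then []
  else
    let adj1 := (rel_edges.getD []).foldl (fun d e => pvAddEdge d e.1 e.2.1 "relation") PySem.Dict.empty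
    let adj2 := (semantic_edges.getD []).foldl (fun d e => pvAddEdge d e.1 e.2.1 "semantic") adj1
    let adj := if allow_spatial
      then (spatial_edges.getD []).foldl (fun d e => pvAddEdge d e.1 e.2.1 "spatial") adj2
      else adj2
    let inp := PySem.Set.ofList input_tables
    let ml : Int := max max_len (inp.length : Int)
    let starts := PySem.List.sorted inp (fun x => x) false
    PySem.List.sorted2
      ((starts.foldl (pvStartStep adj inp require_spatial max_paths ml)
        ((PySem.Set.empty : PySem.Set (List String)), false)).1)
      (fun p => (p.length : Int)) (fun p => p) false

-- ===== PORT B =====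
-- B-side helpers: pvExtend = the inner 'for left, right, _ in edges' loop of one group;
-- pvM is the termination measure of the while loop (fuel-free well-founded recursion);
-- pvRunB = the while loop over the explicit stack. The Lean list's HEAD is the Python stack's
-- END (the element pop() takes), so Python's reversed() push-loop is a prepend in list order.
def pvExtend (d : PySem.Dict String (List (String × String)))
    (edges : List (String × String × String)) (t : String) :
    PySem.Dict String (List (String × String)) :=
  edges.foldl (fun acc e => pvAddEdge acc e.1 e.2.1 t) d

def pvM (ml : Int) (bnd : Nat) (stack : List (String × List String × Bool)) : Nat :=
  (stack.map (fun f => (bnd + 1) ^ ((ml + 1 - (f.2.1.length : Int)).toNat))).sum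

theorem pvGetD_len_le (d : PySem.Dict String (List (String × String))) (k : String) :
    (d.getD k []).length ≤ (d.values.map List.length).sum := by
  rcases h : d.get? k with _ | v
  · rw [PySem.Dict.getD_eq_get?_getD, h]; exact Nat.zero_le _
  · rw [PySem.Dict.getD_eq_get?_getD, h]
    simp only [Option.getD_some]
    have hv : v ∈ d.values := by
      have := PySem.Dict.mem_items_of_get?_eq_some d h
      simp only [PySem.Dict.values]
      exact List.mem_map.2 ⟨(k, v), this, rfl⟩
    exact List.single_le_sum (fun x _ => Nat.zero_le x) _ (List.mem_map.2 ⟨v, hv, rfl⟩)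

theorem pvM_tail_lt (ml : Int) (bnd : Nat) (f : String × List String × Bool)
    (rest : List (String × List String × Bool)) :
    pvM ml bnd rest < pvM ml bnd (f :: rest) := by
  simp only [pvM, List.map_cons, List.sum_cons]
  have : 0 < (bnd + 1) ^ ((ml + 1 - (f.2.1.length : Int)).toNat) :=
    Nat.pow_pos (Nat.succ_pos bnd)
  omega

theorem pvM_children_lt (ml : Int) (bnd : Nat) (ns : List (String × String))
    (path : List String) (hs : Bool) (cur : String)
    (rest : List (String × List String × Bool))
    (hb : ns.length ≤ bnd) (hlt : (path.length : Int) < ml) :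
    pvM ml bnd
      (((ns.filter (fun ne => !path.contains ne.1)).map
        (fun ne => (ne.1, path ++ [ne.1], hs || ne.2 == "spatial"))) ++ rest)
      < pvM ml bnd ((cur, path, hs) :: rest) := by
  have hfl : (ns.filter (fun ne => !path.contains ne.1)).length ≤ bnd :=
    le_trans (List.length_filter_le _ _) hb
  simp only [pvM, List.map_append, List.sum_append, List.map_cons, List.sum_cons,
    List.map_map, Function.comp_def]
  have hone : ∀ ne : String × String,
      (bnd + 1) ^ ((ml + 1 - (((path ++ [ne.1]).length : Nat) : Int)).toNat)
        = (bnd + 1) ^ ((ml - (path.length : Int)).toNat) := by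
    intro ne
    congr 1
    simp only [List.length_append, List.length_cons, List.length_nil]
    omega
  rw [List.map_congr_left (fun ne _ => hone ne), List.map_const', List.sum_replicate,
    smul_eq_mul]
  have he : ((ml + 1 - (path.length : Int)).toNat) = ((ml - (path.length : Int)).toNat) + 1 := by
    omega
  rw [he, pow_succ]
  have hp : 0 < (bnd + 1) ^ ((ml - (path.length : Int)).toNat) :=
    Nat.pow_pos (Nat.succ_pos bnd)
  nlinarith

def pvRunB (adj : PySem.Dict String (List (String × String))) (inp : PySem.Set String)
    (require_spatial : Bool) (max_paths maxLenN : Int)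
    (stack : List (String × List String × Bool)) (paths : PySem.Set (List String)) :
    PySem.Set (List String) :=
  match stack with
  | [] => paths
  | (current, path, hs) :: rest =>
    if max_paths ≤ (paths.length : Int) then paths
    else
      let paths1 := if PySem.Set.issubset inp path && (!require_spatial || hs)
        then PySem.Set.add paths path else paths
      if h : (path.length : Int) < maxLenN then
        pvRunB adj inp require_spatial max_paths maxLenN
          ((((adj.getD current []).filter (fun ne => !path.contains ne.1)).map
            (fun ne => (ne.1, path ++ [ne.1], hs || ne.2 == "spatial"))) ++ rest) paths1
      else
        pvRunB adj inp require_spatial max_paths maxLenN rest paths1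
termination_by pvM maxLenN ((adj.values.map List.length).sum) stack
decreasing_by
  · exact pvM_children_lt _ _ _ _ _ _ _ (pvGetD_len_le adj current) h
  · exact pvM_tail_lt _ _ _ _

def collect_join_paths_py_alt (input_tables : List String) (rel_edges : Option (List (String × String × String))) (semantic_edges : Option (List (String × String × String))) (spatial_edges : Option (List (String × String × String))) (allow_spatial : Bool) (require_spatial : Bool) (max_paths : Int) (max_len : Int) : List (List String) :=
  if input_tables = [] then []
  else
    let groups := [(rel_edges.getD [], "relation"), (semantic_edges.getD [], "semantic")]
      ++ (if allow_spatial then [(spatial_edges.getD [], "spatial")] else [])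
    let adj := groups.foldl (fun d g => pvExtend d g.1 g.2) PySem.Dict.empty
    let required := PySem.Set.ofList input_tables
    let ml : Int := max max_len (required.length : Int)
    let stack0 := (PySem.List.sorted required (fun x => x) false).map (fun s => (s, [s], false))
    PySem.List.sorted2
      (pvRunB adj required require_spatial max_paths ml stack0 PySem.Set.empty)
      (fun p => (p.length : Int)) (fun p => p) false

-- ===== PRECONDITION & SPEC =====
def Spec_collect_join_paths_py (input_tables : List String) (rel_edges : Option (List (String × String × String))) (semantic_edges : Option (List (String × String × String))) (spatial_edges : Option (List (String × String × String))) (allow_spatial : Bool) (require_spatial : Bool) (max_paths : Int) (max_len : Int) (out : List (List String)) : Prop := out = collect_join_paths_py_alt input_tables rel_edges semantic_edges spatial_edges allow_spatial require_spatial max_paths max_len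
instance (input_tables : List String) (rel_edges : Option (List (String × String × String))) (semantic_edges : Option (List (String × String × String))) (spatial_edges : Option (List (String × String × String))) (allow_spatial : Bool) (require_spatial : Bool) (max_paths : Int) (max_len : Int) (out : List (List String)) : Decidable (Spec_collect_join_paths_py input_tables rel_edges semantic_edges spatial_edges allow_spatial require_spatial max_paths max_len out) := by unfold Spec_collect_join_paths_py; infer_instance

-- ===== CLAIM (what is proved, stated in full; the proofs are below) =====
def Claim_equal_collect_join_paths_py : Prop := ∀ (input_tables : List String) (rel_edges : Option (List (String × String × String))) (semantic_edges : Option (List (String × String × String))) (spatial_edges : Option (List (String × String × String))) (allow_spatial : Bool) (require_spatial : Bool) (max_paths : Int) (max_len : Int), Dom_collect_join_paths_py input_tables rel_edges semantic_edges spatial_edges allow_spatial require_spatial max_paths max_len → Spec_collect_join_paths_py input_tables rel_edges semantic_edges spatial_edges allow_spatial require_spatial max_paths max_len (collect_join_paths_py input_tables rel_edges semantic_edges spatial_edges allow_spatial require_spatial max_paths max_len)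

-- ===== LEMMAS AND PROOFS =====

-- pvInner names the anonymous step function of A's inner neighbor loop (state = (paths, broke-flag)).
def pvInner (adj : PySem.Dict String (List (String × String))) (inp : PySem.Set String)
    (rs : Bool) (mp ml : Int) (fuel : Nat) (path : List String) (hs : Bool)
    (st : PySem.Set (List String) × Bool) (ne : String × String) :
    PySem.Set (List String) × Bool :=
  if st.2 then st
  else if path.contains ne.1 then st
  else
    let p2 := pvDfsA adj inp rs mp ml fuel ne.1 (path ++ [ne.1]) (hs || ne.2 == "spatial") st.1
    (p2, decide (mp ≤ (p2.length : Int)))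

theorem pvDfsA_succ (adj : PySem.Dict String (List (String × String))) (inp : PySem.Set String)
    (rs : Bool) (mp ml : Int) (fuel : Nat) (cur : String) (path : List String) (hs : Bool)
    (p : PySem.Set (List String)) :
    pvDfsA adj inp rs mp ml (fuel+1) cur path hs p =
      if mp ≤ (p.length : Int) then p
      else
        let paths1 := if PySem.Set.issubset inp path && (!rs || hs)
          then PySem.Set.add p path else p
        if ml ≤ (path.length : Int) then paths1
        else ((adj.getD cur []).foldl (pvInner adj inp rs mp ml fuel path hs) (paths1, false)).1 :=
  rfl

-- once the cap is reached, _dfs is the identity on paths (its entry check), for any fuel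
theorem pvDfsA_cap (adj : PySem.Dict String (List (String × String))) (inp : PySem.Set String)
    (rs : Bool) (mp ml : Int) (fuel : Nat) (cur : String) (path : List String) (hs : Bool)
    (p : PySem.Set (List String)) (h : mp ≤ (p.length : Int)) :
    pvDfsA adj inp rs mp ml fuel cur path hs p = p := by
  cases fuel <;> simp [pvDfsA, h]

-- folding any cap-respecting step over a capped state changes nothing
theorem pvFoldl_cap {α : Type} (mp : Int) (F : PySem.Set (List String) → α → PySem.Set (List String))
    (hF : ∀ p x, mp ≤ (p.length : Int) → F p x = p) :
    ∀ (l : List α) (p : PySem.Set (List String)), mp ≤ (p.length : Int) → l.foldl F p = p := by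
  intro l
  induction l with
  | nil => intro p _; rfl
  | cons x t ih => intro p h; rw [List.foldl_cons, hF p x h]; exact ih p h

theorem pvInner_flag (adj : PySem.Dict String (List (String × String))) (inp : PySem.Set String)
    (rs : Bool) (mp ml : Int) (fuel : Nat) (path : List String) (hs : Bool) :
    ∀ (ns : List (String × String)) (st : PySem.Set (List String) × Bool), st.2 = true →
      ns.foldl (pvInner adj inp rs mp ml fuel path hs) st = st := by
  intro ns
  induction ns with
  | nil => intro st _; rfl
  | cons ne t ih => intro st h; rw [List.foldl_cons]; rw [pvInner, if_pos h]; exact ih st h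

-- A's inner loop (with its skip / early-return flag) is a plain fold of _dfs over the
-- neighbors not already on the path
theorem pvInner_eq (adj : PySem.Dict String (List (String × String))) (inp : PySem.Set String)
    (rs : Bool) (mp ml : Int) (fuel : Nat) (path : List String) (hs : Bool) :
    ∀ (ns : List (String × String)) (p : PySem.Set (List String)),
      (ns.foldl (pvInner adj inp rs mp ml fuel path hs) (p, false)).1 =
        (ns.filter (fun ne => !path.contains ne.1)).foldl
          (fun s ne => pvDfsA adj inp rs mp ml fuel ne.1 (path ++ [ne.1])
            (hs || ne.2 == "spatial") s) p := by
  intro ns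
  induction ns with
  | nil => intro p; rfl
  | cons ne t ih =>
    intro p
    rw [List.foldl_cons, List.filter_cons]
    by_cases hin : path.contains ne.1
    · have h1 : pvInner adj inp rs mp ml fuel path hs (p, false) ne = (p, false) := by
        rw [pvInner, if_neg (by simp), if_pos hin]
      rw [h1, if_neg (by simpa using hin)]
      exact ih p
    · have h1 : pvInner adj inp rs mp ml fuel path hs (p, false) ne =
          (pvDfsA adj inp rs mp ml fuel ne.1 (path ++ [ne.1]) (hs || ne.2 == "spatial") p,
           decide (mp ≤ ((pvDfsA adj inp rs mp ml fuel ne.1 (path ++ [ne.1])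
             (hs || ne.2 == "spatial") p).length : Int))) := by
        rw [pvInner, if_neg (by simp), if_neg hin]
      rw [h1, if_pos (by simpa using hin), List.foldl_cons]
      set p2 := pvDfsA adj inp rs mp ml fuel ne.1 (path ++ [ne.1]) (hs || ne.2 == "spatial") p
        with hp2
      by_cases hcap : mp ≤ (p2.length : Int)
    -- cap reached right after this child: the flag skips the rest on both sides
      · rw [decide_eq_true hcap, pvInner_flag _ _ _ _ _ _ _ _ t (p2, true) rfl]
        exact (pvFoldl_cap mp
          (fun (s : PySem.Set (List String)) (ne : String × String) =>
            pvDfsA adj inp rs mp ml fuel ne.1 (path ++ [ne.1])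
            (hs || ne.2 == "spatial") s)
          (fun q x h => pvDfsA_cap _ _ _ _ _ _ _ _ _ _ h) _ p2 hcap).symm
      · rw [decide_eq_false hcap]
        exact ih p2

-- one pvRunB step applied to frame f equals _dfs on f with exactly the fuel the frame needs
def pvStep (adj : PySem.Dict String (List (String × String))) (inp : PySem.Set String)
    (rs : Bool) (mp ml : Int) (p : PySem.Set (List String))
    (f : String × List String × Bool) : PySem.Set (List String) :=
  pvDfsA adj inp rs mp ml ((ml + 1 - (f.2.1.length : Int)).toNat) f.1 f.2.1 f.2.2 p

-- THE BRIDGE: the explicit-stack loop computes the left fold of _dfs over the pending frames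
theorem pvRun_eq (adj : PySem.Dict String (List (String × String))) (inp : PySem.Set String)
    (rs : Bool) (mp ml : Int)
    (stack : List (String × List String × Bool)) (p : PySem.Set (List String))
    (hst : ∀ f ∈ stack, (f.2.1.length : Int) ≤ ml) :
    pvRunB adj inp rs mp ml stack p = stack.foldl (pvStep adj inp rs mp ml) p := by
  match stack with
  | [] => rw [pvRunB]; rfl
  | (cur, path, hs) :: rest =>
    rw [pvRunB]
    have hpath : ((path.length : Int)) ≤ ml := hst (cur, path, hs) (by simp)
    have hrest : ∀ f ∈ rest, ((f.2.1.length : Int)) ≤ ml := fun f hf => hst f (by simp [hf])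
    rw [List.foldl_cons]
    by_cases hcap : mp ≤ (p.length : Int)
    · rw [if_pos hcap]
      have h1 : pvStep adj inp rs mp ml p (cur, path, hs) = p :=
        pvDfsA_cap _ _ _ _ _ _ _ _ _ _ hcap
      rw [h1, pvFoldl_cap mp (pvStep adj inp rs mp ml)
        (fun q f h => pvDfsA_cap _ _ _ _ _ _ _ _ _ _ h) rest p hcap]
    · rw [if_neg hcap]
      have he : ((ml + 1 - (path.length : Int)).toNat) = ((ml - (path.length : Int)).toNat) + 1 := by
        omega
      rw [pvStep]
      simp only [he, pvDfsA_succ]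
      rw [if_neg hcap]
      set paths1 := if PySem.Set.issubset inp path && (!rs || hs)
        then PySem.Set.add p path else p with hp1
      by_cases hlen : (path.length : Int) < ml
      · rw [dif_pos hlen, if_neg (by omega)]
        rw [pvRun_eq adj inp rs mp ml _ paths1 ?hchild]
        case hchild =>
          intro f hf
          rcases List.mem_append.1 hf with hf | hf
          · rcases List.mem_map.1 hf with ⟨ne, _, rfl⟩
            simp
            omega
          · exact hrest f hf
        rw [List.foldl_append]
        congr 1
        rw [pvInner_eq, List.foldl_map]
        refine PySem.List.foldl_congr_mem _ _ _ _ ?_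
        intro acc ne _
        simp only [pvStep]
        have hf : ((ml + 1 - (((path ++ [ne.1]).length : Nat) : Int)).toNat)
            = ((ml - ((path.length : Nat) : Int)).toNat) := by
          simp only [List.length_append, List.length_cons, List.length_nil]
          omega
        rw [hf]
      · rw [dif_neg hlen, if_pos (by omega)]
        exact pvRun_eq adj inp rs mp ml rest paths1 hrest
termination_by pvM ml ((adj.values.map List.length).sum) stack
decreasing_by
  · exact pvM_children_lt ml _ (adj.getD cur []) path hs cur rest (pvGetD_len_le adj cur) hlen
  · exact pvM_tail_lt _ _ _ _

-- the top-level start loop (with its break flag) is the same plain fold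
theorem pvTop_eq (adj : PySem.Dict String (List (String × String))) (inp : PySem.Set String)
    (rs : Bool) (mp ml : Int) :
    ∀ (starts : List String) (p : PySem.Set (List String)),
      (starts.foldl (pvStartStep adj inp rs mp ml) (p, false)).1 =
        starts.foldl (fun acc s => pvDfsA adj inp rs mp ml ml.toNat s [s] false acc) p := by
  intro starts
  induction starts with
  | nil => intro p; rfl
  | cons s t ih =>
    intro p
    rw [List.foldl_cons, List.foldl_cons]
    rw [pvStartStep]
    simp only [Bool.false_eq_true, if_false]
    set q := pvDfsA adj inp rs mp ml ml.toNat s [s] false p with hq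
    by_cases hcap : mp ≤ (q.length : Int)
    · simp only [hcap, decide_true]
      have hflag : ∀ (l : List String) (st : PySem.Set (List String) × Bool), st.2 = true →
          l.foldl (pvStartStep adj inp rs mp ml) st = st := by
        intro l
        induction l with
        | nil => intro st _; rfl
        | cons x u ihx => intro st h; rw [List.foldl_cons, pvStartStep, if_pos h]; exact ihx st h
      rw [hflag t (q, true) rfl]
      rw [pvFoldl_cap mp _ (fun r s h => pvDfsA_cap _ _ _ _ _ _ _ _ _ _ h) _ q hcap]
    · simp only [hcap, decide_false]
      exact ih q

-- the whole stack run from the start frames equals A's top-level loop over the sorted starts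
theorem pvBridge (adj : PySem.Dict String (List (String × String))) (inp : PySem.Set String)
    (rs : Bool) (mp ml : Int) (hml : (1 : Int) ≤ ml) (starts : List String) :
    pvRunB adj inp rs mp ml (starts.map (fun s => (s, [s], false))) PySem.Set.empty
      = (starts.foldl (pvStartStep adj inp rs mp ml)
          ((PySem.Set.empty : PySem.Set (List String)), false)).1 := by
  rw [pvRun_eq adj inp rs mp ml _ _ ?hf]
  case hf =>
    intro f hf
    rcases List.mem_map.1 hf with ⟨s, _, rfl⟩
    simp
    omega
  rw [List.foldl_map, pvTop_eq]
  refine PySem.List.foldl_congr_mem _ _ _ _ ?_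
  intro acc s _
  simp only [pvStep]
  have hf : ((ml + 1 - ((([s] : List String).length : Nat) : Int)).toNat) = ml.toNat := by
    simp only [List.length_cons, List.length_nil]
    omega
  rw [hf]

-- ===== VERDICT (by name: the statement is the Claim_ definition above) =====
theorem collect_join_paths_py_spec : Claim_equal_collect_join_paths_py := by
  intro input_tables rel_edges semantic_edges spatial_edges allow_spatial require_spatial max_paths max_len _
  unfold Spec_collect_join_paths_py collect_join_paths_py collect_join_paths_py_alt
  by_cases hnil : input_tables = []
  · rw [if_pos hnil, if_pos hnil]
  · rw [if_neg hnil, if_neg hnil]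
    have hml : (1 : Int) ≤ max max_len (((PySem.Set.ofList input_tables).length : Nat) : Int) := by
      obtain ⟨x, hx⟩ := List.exists_mem_of_ne_nil input_tables hnil
      have hx2 : x ∈ PySem.Set.ofList input_tables := by
        rw [PySem.Set.mem_ofList]; exact hx
      have hpos := List.length_pos_of_mem hx2
      have h2 : (1 : Int) ≤ (((PySem.Set.ofList input_tables).length : Nat) : Int) := by
        exact_mod_cast hpos
      exact le_trans h2 (le_max_right _ _)
    cases allow_spatial <;>
      simp only [pvExtend, List.foldl_cons, List.foldl_nil, List.cons_append, List.nil_append,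
        List.append_nil, if_true, if_false, Bool.false_eq_true,
        reduceIte] <;>
      rw [pvBridge _ _ _ _ _ hml]
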